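-- pv_equiv track=rewrite | github.com/amazon-science/CTF-Dojo | forge/validators.py | fix_dockerfile_trailing_backslashes
-- ===== SOURCE A (Python) =====
-- from typing import List, Tuple
--
-- def fix_dockerfile_trailing_backslashes(dockerfile_content: str) -> tuple[str, List[str]]:
--     """
--     Fix problematic trailing backslashes in Dockerfiles that cause build failures.
--     Returns (fixed_dockerfile, list_of_fixes_made).
--     """
--     lines = dockerfile_content.split('\n')
--     fixed_lines = []
--     fixes_made = []
--
--     docker_commands = ['FROM', 'RUN', 'COPY', 'ADD', 'WORKDIR', 'ENV', 'EXPOSE', 'CMD', 'ENTRYPOINT', 'USER', 'VOLUME', 'LABEL', 'ARG', 'ONBUILD', 'STOPSIGNAL', 'HEALTHCHECK', 'SHELL']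
--
--     for i, line in enumerate(lines):
--         current_line = line
--         line_stripped = line.strip()
--
--         if line_stripped.endswith('\\'):
--             next_line_idx = i + 1
--             while next_line_idx < len(lines) and not lines[next_line_idx].strip():
--                 next_line_idx += 1
--
--             if next_line_idx < len(lines):
--                 next_line = lines[next_line_idx].strip()
--                 if any(next_line.upper().startswith(cmd) for cmd in docker_commands):
--                     current_line = line.rstrip().rstrip('\\').rstrip()
--                     fixes_made.append(f"Line {i+1}: Removed problematic trailing backslash before {next_line.split()[0]} command")
--
--         fixed_lines.append(current_line)
--
--     return '\n'.join(fixed_lines), fixes_made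
-- ===== SOURCE B (Python) =====
-- def fix_dockerfile_trailing_backslashes(dockerfile_content: str):
--     """Single reverse pass: carry the nearest non-blank stripped line seen below
--     instead of re-scanning ahead with an inner while-loop."""
--     docker_commands = ['FROM', 'RUN', 'COPY', 'ADD', 'WORKDIR', 'ENV', 'EXPOSE', 'CMD', 'ENTRYPOINT', 'USER', 'VOLUME', 'LABEL', 'ARG', 'ONBUILD', 'STOPSIGNAL', 'HEALTHCHECK', 'SHELL']
--     lines = dockerfile_content.split('\n')
--     fixed = []
--     fixes = []
--     next_sig = None  # stripped text of nearest non-blank line below the current one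
--     for i in range(len(lines) - 1, -1, -1):
--         line = lines[i]
--         s = line.strip()
--         if s.endswith('\\') and next_sig is not None and any(next_sig.upper().startswith(c) for c in docker_commands):
--             fixed.append(line.rstrip().rstrip('\\').rstrip())
--             fixes.append(f"Line {i+1}: Removed problematic trailing backslash before {next_sig.split()[0]} command")
--         else:
--             fixed.append(line)
--         if s:
--             next_sig = s
--     fixed.reverse()
--     fixes.reverse()
--     return '\n'.join(fixed), fixes
-- ===== Notes on version B (the rewrite author's own statement) =====
-- stated objective: alternative
-- what changed: Replaces the forward pass with an inner while-loop lookahead for the next non-blank line by a single reverse pass that carries the nearest non-blank stripped line as state (no inner scan), building the fix list back-to-front and reversing it.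
import Mathlib
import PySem

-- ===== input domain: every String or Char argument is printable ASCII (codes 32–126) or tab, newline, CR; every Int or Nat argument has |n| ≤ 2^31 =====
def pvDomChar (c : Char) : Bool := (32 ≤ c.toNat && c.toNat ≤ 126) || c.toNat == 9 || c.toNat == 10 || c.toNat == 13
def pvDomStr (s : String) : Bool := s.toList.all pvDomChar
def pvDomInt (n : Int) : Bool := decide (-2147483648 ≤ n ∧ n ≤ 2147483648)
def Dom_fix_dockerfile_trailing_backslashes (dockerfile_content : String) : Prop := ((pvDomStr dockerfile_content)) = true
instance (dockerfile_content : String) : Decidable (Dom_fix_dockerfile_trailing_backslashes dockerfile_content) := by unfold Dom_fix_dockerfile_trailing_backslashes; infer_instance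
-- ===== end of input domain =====

-- B replaces A's inner while-loop lookahead by one reverse pass carrying the nearest
-- non-blank stripped line seen below (objective: alternative decomposition, same value).


-- helpers shared verbatim by both Pythons (same constant, same subexpressions)
def pvDockerCommands : List (List Char) :=
  ["FROM".toList, "RUN".toList, "COPY".toList, "ADD".toList, "WORKDIR".toList, "ENV".toList,
   "EXPOSE".toList, "CMD".toList, "ENTRYPOINT".toList, "USER".toList, "VOLUME".toList,
   "LABEL".toList, "ARG".toList, "ONBUILD".toList, "STOPSIGNAL".toList, "HEALTHCHECK".toList,
   "SHELL".toList]

-- any(next_line.upper().startswith(cmd) for cmd in docker_commands)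
def pvIsSig (nl : List Char) : Bool :=
  pvDockerCommands.any (fun c => PySem.Chars.startswith (PySem.Chars.upper nl) c)

-- s.rstrip('\\')  (exact: removes trailing backslashes only)
def pvRstripBS (cs : List Char) : List Char := (cs.reverse.dropWhile (· == '\\')).reverse

-- line.rstrip().rstrip('\\').rstrip()
def pvFixLine (line : List Char) : List Char :=
  PySem.Chars.rstrip (pvRstripBS (PySem.Chars.rstrip line))

-- f"Line {i+1}: Removed problematic trailing backslash before {nl.split()[0]} command"
-- (nl.split() is non-empty whenever the guard pvIsSig nl holds, so headD is exact there)
def pvMsg (i : Nat) (nl : List Char) : List Char :=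
  "Line ".toList ++ PySem.Int.toChars ((i : Int) + 1) ++
  ": Removed problematic trailing backslash before ".toList ++
  (PySem.Chars.split₀ nl).headD [] ++ " command".toList

-- ===== PORT A =====
-- the inner while-loop: skip blank lines from index j
def pvFindNext (lines : List (List Char)) (j : Nat) : Nat :=
  if h : j < lines.length then
    if (PySem.Chars.strip lines[j]).isEmpty then pvFindNext lines (j + 1) else j
  else j
termination_by lines.length - j

def fix_dockerfile_trailing_backslashes (dockerfile_content : String) : String × List String :=
  let lines := PySem.Chars.splitOn dockerfile_content.toList ['\n']
  let res := lines.zipIdx.foldl (fun (acc : List (List Char) × List (List Char)) p =>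
    let line := p.1
    let i := p.2
    let s := PySem.Chars.strip line
    if PySem.Chars.endswith s ['\\'] then
      let k := pvFindNext lines (i + 1)
      if h : k < lines.length then
        let nl := PySem.Chars.strip lines[k]
        if pvIsSig nl then (acc.1 ++ [pvFixLine line], acc.2 ++ [pvMsg i nl])
        else (acc.1 ++ [line], acc.2)
      else (acc.1 ++ [line], acc.2)
    else (acc.1 ++ [line], acc.2)) ([], [])
  (String.mk (PySem.Chars.join ['\n'] res.1), res.2.map String.mk)

-- ===== PORT B =====
-- reverse loop, rendered as recursion that handles the lines below first and hands
-- back (fixed lines, fixes, next_sig = stripped text of nearest non-blank line)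
def pvAltGo : Nat → List (List Char) → List (List Char) × List (List Char) × Option (List Char)
  | _, [] => ([], [], none)
  | i, line :: rest =>
    let r := pvAltGo (i + 1) rest
    let s := PySem.Chars.strip line
    let out :=
      match r.2.2 with
      | some nl =>
        if PySem.Chars.endswith s ['\\'] && pvIsSig nl then
          (pvFixLine line :: r.1, pvMsg i nl :: r.2.1)
        else (line :: r.1, r.2.1)
      | none => (line :: r.1, r.2.1)
    (out.1, out.2, if s.isEmpty then r.2.2 else some s)

def fix_dockerfile_trailing_backslashes_alt (dockerfile_content : String) : String × List String :=
  let lines := PySem.Chars.splitOn dockerfile_content.toList ['\n']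
  let r := pvAltGo 0 lines
  (String.mk (PySem.Chars.join ['\n'] r.1), r.2.1.map String.mk)

-- ===== PRECONDITION & SPEC =====
def Spec_fix_dockerfile_trailing_backslashes (dockerfile_content : String) (out : String × List String) : Prop := out = fix_dockerfile_trailing_backslashes_alt dockerfile_content
instance (dockerfile_content : String) (out : String × List String) : Decidable (Spec_fix_dockerfile_trailing_backslashes dockerfile_content out) := by unfold Spec_fix_dockerfile_trailing_backslashes; infer_instance

-- ===== CLAIM (what is proved, stated in full; the proofs are below) =====
def Claim_equal_fix_dockerfile_trailing_backslashes : Prop := ∀ (dockerfile_content : String), Dom_fix_dockerfile_trailing_backslashes dockerfile_content → Spec_fix_dockerfile_trailing_backslashes dockerfile_content (fix_dockerfile_trailing_backslashes dockerfile_content)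


-- ===== LEMMAS AND PROOFS =====

-- the stripped text of the first non-blank line of a suffix (B's carried next_sig)
def pvSig : List (List Char) → Option (List Char)
  | [] => none
  | l :: ls => if (PySem.Chars.strip l).isEmpty then pvSig ls else some (PySem.Chars.strip l)

-- the per-line value and message list given the signature below
def pvCur (_i : Nat) (line : List Char) (sig : Option (List Char)) : List Char :=
  match sig with
  | some nl => if PySem.Chars.endswith (PySem.Chars.strip line) ['\\'] && pvIsSig nl
               then pvFixLine line else line
  | none => line

def pvMsgs (i : Nat) (line : List Char) (sig : Option (List Char)) : List (List Char) :=
  match sig with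
  | some nl => if PySem.Chars.endswith (PySem.Chars.strip line) ['\\'] && pvIsSig nl
               then [pvMsg i nl] else []
  | none => []

-- A's loop body per element, as pure functions of the (line, index) pair
def pvACur (lines : List (List Char)) (p : List Char × Nat) : List Char :=
  if PySem.Chars.endswith (PySem.Chars.strip p.1) ['\\'] then
    if h : pvFindNext lines (p.2 + 1) < lines.length then
      if pvIsSig (PySem.Chars.strip lines[pvFindNext lines (p.2 + 1)]) then pvFixLine p.1 else p.1
    else p.1
  else p.1

def pvAMsgs (lines : List (List Char)) (p : List Char × Nat) : List (List Char) :=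
  if PySem.Chars.endswith (PySem.Chars.strip p.1) ['\\'] then
    if h : pvFindNext lines (p.2 + 1) < lines.length then
      if pvIsSig (PySem.Chars.strip lines[pvFindNext lines (p.2 + 1)])
      then [pvMsg p.2 (PySem.Chars.strip lines[pvFindNext lines (p.2 + 1)])] else []
    else []
  else []

-- A's lookahead computes exactly pvSig of the suffix
lemma findNext_sig (lines : List (List Char)) (j : Nat) :
    (if h : pvFindNext lines j < lines.length
     then some (PySem.Chars.strip lines[pvFindNext lines j]) else none)
      = pvSig (lines.drop j) := by
  by_cases hj : j < lines.length
  · rw [← List.getElem_cons_drop hj]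
    by_cases he : (PySem.Chars.strip lines[j]).isEmpty
    · rw [pvFindNext]
      simp only [hj, he, if_true, dif_pos]
      rw [findNext_sig lines (j + 1)]
      simp [pvSig, he]
    · have : pvFindNext lines j = j := by rw [pvFindNext]; simp [hj, he]
      simp [this, hj, pvSig, he]
  · have hd : lines.drop j = [] := List.drop_eq_nil_of_le (by omega)
    have : pvFindNext lines j = j := by rw [pvFindNext]; simp [hj]
    simp [this, hj, hd, pvSig]
termination_by lines.length - j

-- A's per-element functions in terms of pvSig
lemma aCur_eq (lines : List (List Char)) (p : List Char × Nat) :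
    pvACur lines p = pvCur p.2 p.1 (pvSig (lines.drop (p.2 + 1))) := by
  rw [← findNext_sig lines (p.2 + 1)]
  by_cases h : pvFindNext lines (p.2 + 1) < lines.length <;>
    simp only [pvACur, pvCur, h, dif_pos, dif_neg, not_false_iff] <;>
    split_ifs <;> simp_all

lemma aMsgs_eq (lines : List (List Char)) (p : List Char × Nat) :
    pvAMsgs lines p = pvMsgs p.2 p.1 (pvSig (lines.drop (p.2 + 1))) := by
  rw [← findNext_sig lines (p.2 + 1)]
  by_cases h : pvFindNext lines (p.2 + 1) < lines.length <;>
    simp only [pvAMsgs, pvMsgs, h, dif_pos, dif_neg, not_false_iff] <;>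
    split_ifs <;> simp_all

-- B's recursion in closed form
lemma altGo_eq (ls : List (List Char)) (i : Nat) :
    pvAltGo i ls =
      ((List.range ls.length).map (fun k => pvCur (i + k) (ls.getD k []) (pvSig (ls.drop (k + 1)))),
       (List.range ls.length).flatMap (fun k => pvMsgs (i + k) (ls.getD k []) (pvSig (ls.drop (k + 1)))),
       pvSig ls) := by
  induction ls generalizing i with
  | nil => simp [pvAltGo, pvSig]
  | cons l rest ih =>
    rw [pvAltGo]
    simp only [ih (i + 1)]
    simp only [List.length_cons, List.range_succ_eq_map, List.map_cons, List.flatMap_cons,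
      List.map_map, List.flatMap_map, List.getD_cons_zero, List.getD_cons_succ,
      List.drop_succ_cons, Nat.add_zero]
    have hidx2 : ∀ k : Nat, i + 1 + k = i + (k + 1) := by omega
    cases hs : pvSig rest with
    | none =>
      simp only [pvCur, pvMsgs, pvSig, hs]
      simp [hidx2, hs]
    | some nl =>
      by_cases hc : (PySem.Chars.endswith (PySem.Chars.strip l) ['\\'] && pvIsSig nl) = true
      · simp only [Bool.and_eq_true] at hc
        simp [pvCur, pvMsgs, pvSig, hs, hc.1, hc.2, hidx2]
      · have hc' : ¬(PySem.Chars.endswith (PySem.Chars.strip l) ['\\'] = true ∧ pvIsSig nl = true) := by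
          simpa [Bool.and_eq_true] using hc
        simp [pvCur, pvMsgs, pvSig, hs, hc', hidx2]

-- zipIdx as a map over range
lemma zipIdx_eq_range_map (ls : List (List Char)) :
    ls.zipIdx = (List.range ls.length).map (fun k => (ls.getD k [], k)) := by
  apply List.ext_getElem
  · simp
  · intro k h1 h2
    simp only [List.length_zipIdx] at h1
    simp only [List.getElem_zipIdx, List.getElem_map, List.getElem_range,
      List.getD_eq_getElem ls [] h1, Nat.zero_add]

-- A's fold in the same closed form
lemma aFold_eq (lines : List (List Char)) :
    lines.zipIdx.foldl (fun (acc : List (List Char) × List (List Char)) p =>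
      let line := p.1
      let i := p.2
      let s := PySem.Chars.strip line
      if PySem.Chars.endswith s ['\\'] then
        let k := pvFindNext lines (i + 1)
        if h : k < lines.length then
          let nl := PySem.Chars.strip lines[k]
          if pvIsSig nl then (acc.1 ++ [pvFixLine line], acc.2 ++ [pvMsg i nl])
          else (acc.1 ++ [line], acc.2)
        else (acc.1 ++ [line], acc.2)
      else (acc.1 ++ [line], acc.2)) ([], [])
    = ((List.range lines.length).map (fun k => pvCur k (lines.getD k []) (pvSig (lines.drop (k + 1)))),
       (List.range lines.length).flatMap (fun k => pvMsgs k (lines.getD k []) (pvSig (lines.drop (k + 1))))) := by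
  have hstep : (fun (acc : List (List Char) × List (List Char)) (p : List Char × Nat) =>
      let line := p.1
      let i := p.2
      let s := PySem.Chars.strip line
      if PySem.Chars.endswith s ['\\'] then
        let k := pvFindNext lines (i + 1)
        if h : k < lines.length then
          let nl := PySem.Chars.strip lines[k]
          if pvIsSig nl then (acc.1 ++ [pvFixLine line], acc.2 ++ [pvMsg i nl])
          else (acc.1 ++ [line], acc.2)
        else (acc.1 ++ [line], acc.2)
      else (acc.1 ++ [line], acc.2))
    = (fun acc p => (acc.1 ++ [pvACur lines p], acc.2 ++ pvAMsgs lines p)) := by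
    funext acc p
    simp only [pvACur, pvAMsgs]
    split_ifs <;> simp
  rw [hstep]
  rw [PySem.List.foldl_prod_mk (fun a p => a ++ [pvACur lines p]) (fun b p => b ++ pvAMsgs lines p)]
  rw [PySem.List.foldl_append_eq_flatMap (fun p => [pvACur lines p]),
      PySem.List.foldl_append_eq_flatMap (pvAMsgs lines)]
  simp only [List.nil_append]
  rw [zipIdx_eq_range_map, List.flatMap_map, List.flatMap_map]
  refine Prod.ext ?_ ?_
  · exact (List.map_eq_flatMap (f := fun a => pvACur lines (lines.getD a [], a))
      (l := List.range lines.length)).symm.trans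
      (List.map_congr_left (fun k _ => aCur_eq lines _))
  · exact List.flatMap_congr (fun k _ => aMsgs_eq lines _)

-- ===== VERDICT (by name: the statement is the Claim_ definition above) =====
theorem fix_dockerfile_trailing_backslashes_spec : Claim_equal_fix_dockerfile_trailing_backslashes := by
  intro s _
  unfold Spec_fix_dockerfile_trailing_backslashes
  unfold fix_dockerfile_trailing_backslashes fix_dockerfile_trailing_backslashes_alt
  simp only [aFold_eq, altGo_eq, Nat.zero_add]
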